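-- pv_equiv track=rewrite | github.com/eliavw/mercs-v5 | src/mercs/utils/encoding.py | queries_to_codes
-- ===== SOURCE A (Python) =====
-- def queries_to_codes(q_desc, q_targ, q_miss, atts=None):
--     assert len(q_desc) == len(q_targ) == len(q_miss)
--     nb_queries = len(q_desc)
--
--     if atts is None:
--         atts = determine_atts(q_desc[0], q_targ[0], q_miss[0])
--
--     codes = [query_to_code(q_desc[i], q_targ[i], q_miss[i], atts=atts)
--              for i in range(nb_queries)]
--
--     return codes
--
-- def query_to_code(q_desc, q_targ, q_miss, atts=None):
--     if atts is None:
--         atts = determine_atts(q_desc, q_targ, q_miss)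
--
--     code = [encode_attribute(a, q_desc, q_targ) for a in atts]
--
--     return code
--
-- def determine_atts(desc, targ, miss):
--     """
--     Determine the entire list of attributes.
--     """
--     atts = list(set(desc + targ + miss))
--     atts.sort()
--     return atts
--
-- def encode_attribute(att, desc, targ):
--     """
--     Encode the 'role' of an attribute in a model.
--
--     `Role` means:
--         - Descriptive attribute (input)
--         - Target attribute (output)
--         - Missing attribute (not relevant to the model)
--     """
--
--     check_desc = att in desc
--     check_targ = att in targ
--
--     code_int = check_targ * 2 + check_desc - 1
--
--     return code_int
-- ===== SOURCE B (Python) =====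
-- def queries_to_codes(q_desc, q_targ, q_miss, atts=None):
--     assert len(q_desc) == len(q_targ) == len(q_miss)
--     if atts is None:
--         atts = sorted(set(q_desc[0] + q_targ[0] + q_miss[0]))
--     # position index: attribute value -> all its positions in atts (scatter table)
--     pos = {}
--     for j, a in enumerate(atts):
--         pos.setdefault(a, []).append(j)
--     codes = []
--     for desc, targ in zip(q_desc, q_targ):
--         code = [-1] * len(atts)
--         for a in dict.fromkeys(desc):   # distinct attributes, first-occurrence order
--             for j in pos.get(a, ()):
--                 code[j] += 1
--         for a in dict.fromkeys(targ):
--             for j in pos.get(a, ()):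
--                 code[j] += 2
--         codes.append(code)
--     return codes
-- ===== Notes on version B (the rewrite author's own statement) =====
-- stated objective: faster
-- what changed: B inverts the traversal: instead of gathering a code for every attribute by membership scans of desc/targ (A), it builds a position index over atts once and SCATTERS +1 / +2 into a preinitialized [-1]*len(atts) row for each distinct desc/targ attribute, skipping attributes outside atts via the index.
import Mathlib
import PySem

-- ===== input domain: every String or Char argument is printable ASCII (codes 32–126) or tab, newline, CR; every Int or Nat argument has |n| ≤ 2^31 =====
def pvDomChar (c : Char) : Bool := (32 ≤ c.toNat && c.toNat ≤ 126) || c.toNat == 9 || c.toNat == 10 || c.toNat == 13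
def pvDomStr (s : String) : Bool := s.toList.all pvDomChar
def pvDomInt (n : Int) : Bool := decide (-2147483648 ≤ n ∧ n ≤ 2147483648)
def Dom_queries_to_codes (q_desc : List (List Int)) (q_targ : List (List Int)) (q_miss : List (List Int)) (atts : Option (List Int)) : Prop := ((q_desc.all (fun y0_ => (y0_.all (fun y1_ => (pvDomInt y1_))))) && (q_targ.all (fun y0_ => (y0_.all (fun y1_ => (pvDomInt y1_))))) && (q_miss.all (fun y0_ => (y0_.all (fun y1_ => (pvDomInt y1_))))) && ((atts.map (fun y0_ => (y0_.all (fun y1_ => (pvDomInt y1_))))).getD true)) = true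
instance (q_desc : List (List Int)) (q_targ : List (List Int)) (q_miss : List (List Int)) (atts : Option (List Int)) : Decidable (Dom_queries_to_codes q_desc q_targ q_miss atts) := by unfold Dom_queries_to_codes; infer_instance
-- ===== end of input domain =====

-- B inverts A's gather (a membership scan of desc/targ for every attribute) into a scatter:
-- a position index over atts built once, then +1/+2 added at the indexed positions of a
-- preinitialized [-1]*len(atts) row (objective: faster).

-- ===== PORT A =====
def encode_attribute (att : Int) (desc : List Int) (targ : List Int) : Int :=
  (if targ.contains att then (1 : Int) else 0) * 2 + (if desc.contains att then (1 : Int) else 0) - 1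

def determine_atts (desc : List Int) (targ : List Int) (miss : List Int) : List Int :=
  PySem.List.sorted (PySem.Set.ofList (desc ++ targ ++ miss)) (fun x => x) false

def query_to_code (q_desc : List Int) (q_targ : List Int) (q_miss : List Int) (atts : Option (List Int)) : List Int :=
  let atts := match atts with
    | none => determine_atts q_desc q_targ q_miss
    | some a => a
  atts.map (fun a => encode_attribute a q_desc q_targ)

-- headD/getD defaults are unreachable under Pre_ (A raises IndexError/AssertionError outside it)
def queries_to_codes (q_desc : List (List Int)) (q_targ : List (List Int)) (q_miss : List (List Int)) (atts : Option (List Int)) : List (List Int) :=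
  let atts := match atts with
    | none => determine_atts (q_desc.headD []) (q_targ.headD []) (q_miss.headD [])
    | some a => a
  (List.range q_desc.length).map (fun i =>
    query_to_code (q_desc.getD i []) (q_targ.getD i []) (q_miss.getD i []) (some atts))

-- ===== PORT B =====
-- pos.setdefault(a, []).append(j): insert with the old list extended by the new index
def buildPos (atts : List Int) : PySem.Dict Int (List Int) :=
  (PySem.List.enumerate atts 0).foldl
    (fun d ja => d.insert ja.2 ((d.getD ja.2 []) ++ [ja.1])) PySem.Dict.empty

-- code[j] += k: indices j come from enumerate, so 0 ≤ j < len(code) and toNat/getD/set are exact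
def scatter (pos : PySem.Dict Int (List Int)) (k : Int) (code : List Int) (s : List Int) : List Int :=
  s.foldl (fun c a => (pos.getD a []).foldl (fun c j => c.set j.toNat (c.getD j.toNat 0 + k)) c) code

def queries_to_codes_alt (q_desc : List (List Int)) (q_targ : List (List Int)) (q_miss : List (List Int)) (atts : Option (List Int)) : List (List Int) :=
  let atts := match atts with
    | none => PySem.List.sorted (PySem.Set.ofList ((q_desc.headD []) ++ (q_targ.headD []) ++ (q_miss.headD []))) (fun x => x) false
    | some a => a
  let pos := buildPos atts
  (q_desc.zip q_targ).map (fun dt =>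
    scatter pos 2 (scatter pos 1 (List.replicate atts.length (-1 : Int)) (PySem.List.dedup dt.1)) (PySem.List.dedup dt.2))

-- ===== PRECONDITION & SPEC =====
-- Pre_ excludes exactly the inputs on which A raises: unequal query-list lengths (AssertionError)
-- and atts=None with an empty query list (IndexError on q_desc[0]).
def Pre_queries_to_codes (q_desc : List (List Int)) (q_targ : List (List Int)) (q_miss : List (List Int)) (atts : Option (List Int)) : Prop :=
  q_desc.length = q_targ.length ∧ q_targ.length = q_miss.length ∧ (atts = none → q_desc ≠ [])
instance (q_desc : List (List Int)) (q_targ : List (List Int)) (q_miss : List (List Int)) (atts : Option (List Int)) : Decidable (Pre_queries_to_codes q_desc q_targ q_miss atts) := by unfold Pre_queries_to_codes; infer_instance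

def pvWitness_queries_to_codes : List (List Int) × List (List Int) × List (List Int) × Option (List Int) :=
  ([[1, 2]], [[2]], [[3]], none)

def Spec_queries_to_codes (q_desc : List (List Int)) (q_targ : List (List Int)) (q_miss : List (List Int)) (atts : Option (List Int)) (out : List (List Int)) : Prop := out = queries_to_codes_alt q_desc q_targ q_miss atts
instance (q_desc : List (List Int)) (q_targ : List (List Int)) (q_miss : List (List Int)) (atts : Option (List Int)) (out : List (List Int)) : Decidable (Spec_queries_to_codes q_desc q_targ q_miss atts out) := by unfold Spec_queries_to_codes; infer_instance

-- ===== CLAIM (what is proved, stated in full; the proofs are below) =====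
def Claim_equal_queries_to_codes : Prop := ∀ (q_desc : List (List Int)) (q_targ : List (List Int)) (q_miss : List (List Int)) (atts : Option (List Int)), Dom_queries_to_codes q_desc q_targ q_miss atts → Pre_queries_to_codes q_desc q_targ q_miss atts → Spec_queries_to_codes q_desc q_targ q_miss atts (queries_to_codes q_desc q_targ q_miss atts)

-- ===== LEMMAS AND PROOFS =====

-- the position-index fold appends, per key, the kept indices in order
theorem pos_fold (a : Int) : ∀ (l : List (Int × Int)) (d : PySem.Dict Int (List Int)),
    (l.foldl (fun d ja => d.insert ja.2 ((d.getD ja.2 []) ++ [ja.1])) d).getD a []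
      = d.getD a [] ++ l.filterMap (fun ja => if ja.2 = a then some ja.1 else none) := by
  intro l
  induction l with
  | nil => intro d; simp
  | cons p rest ih =>
    intro d
    simp only [List.foldl_cons, ih, List.filterMap_cons]
    by_cases h : p.2 = a
    · simp [h]
    · simp [h, PySem.Dict.getD_insert, Ne.symm h]

theorem mem_buildPos (atts : List Int) (a j : Int) :
    j ∈ (buildPos atts).getD a [] ↔ ∃ (k : Nat), ∃ _ : k < atts.length, j = (k : Int) ∧ atts[k] = a := by
  unfold buildPos
  rw [pos_fold]
  simp only [PySem.Dict.getD_empty, List.nil_append, List.mem_filterMap,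
    PySem.List.mem_enumerate_iff]
  constructor
  · rintro ⟨p, ⟨k, hk, rfl⟩, hp⟩
    by_cases h : atts[k] = a
    · exact ⟨k, hk, by simpa [h] using hp.symm, h⟩
    · simp [h] at hp
  · rintro ⟨k, hk, rfl, h⟩
    exact ⟨((k : Int), atts[k]), ⟨k, hk, by simp⟩, by simp [h]⟩

theorem nodup_buildPos (atts : List Int) (a : Int) : ((buildPos atts).getD a []).Nodup := by
  unfold buildPos
  rw [pos_fold]
  simp only [PySem.Dict.getD_empty, List.nil_append]
  have hpw := PySem.List.pairwise_lt_enumerate (xs := atts) (s := 0)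
  apply List.Pairwise.imp (fun {x y} (h : x < y) => ne_of_lt h)
  rw [List.pairwise_filterMap]
  refine hpw.imp_of_mem ?_
  intro p q _ _ hlt x hx y hy
  split_ifs at hx hy with h1 h2
  simp_all

theorem count_buildPos (atts : List Int) (a : Int) (i : Nat) (hi : i < atts.length) :
    ((buildPos atts).getD a []).count (i : Int) = if atts[i] = a then 1 else 0 := by
  have hmem : (i : Int) ∈ (buildPos atts).getD a [] ↔ atts[i] = a := by
    rw [mem_buildPos]
    constructor
    · rintro ⟨k, hk, hik, h⟩
      have : k = i := by omega
      simpa [this] using h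
    · intro h; exact ⟨i, hi, rfl, h⟩
  by_cases h : atts[i] = a
  · have h1 := List.count_pos_iff.mpr (hmem.mpr h)
    have h2 := List.nodup_iff_count_le_one.mp (nodup_buildPos atts a) (i : Int)
    rw [if_pos h]; omega
  · rw [if_neg h]
    exact List.count_eq_zero_of_not_mem (fun hc => h (hmem.mp hc))

-- bounds of the indices stored in the position index
theorem buildPos_bounds (atts : List Int) (a : Int) :
    ∀ j ∈ (buildPos atts).getD a [], 0 ≤ j ∧ j.toNat < atts.length := by
  intro j hj
  obtain ⟨k, hk, rfl, _⟩ := (mem_buildPos atts a j).mp hj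
  constructor
  · exact Int.natCast_nonneg k
  · simpa using hk

theorem inner_length (k : Int) : ∀ (js : List Int) (c : List Int),
    (js.foldl (fun c j => c.set j.toNat (c.getD j.toNat 0 + k)) c).length = c.length := by
  intro js
  induction js with
  | nil => intro c; rfl
  | cons j rest ih =>
    intro c
    rw [List.foldl_cons, ih, List.length_set]

theorem inner_getD (k : Int) : ∀ (js : List Int) (c : List Int),
    (∀ j ∈ js, 0 ≤ j ∧ j.toNat < c.length) → ∀ (i : Nat), i < c.length →
    (js.foldl (fun c j => c.set j.toNat (c.getD j.toNat 0 + k)) c).getD i 0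
      = c.getD i 0 + k * js.count (i : Int) := by
  intro js
  induction js with
  | nil => intro c _ i _; simp
  | cons j rest ih =>
    intro c hb i hi
    obtain ⟨hj0, hjl⟩ := hb j (by simp)
    have hlen : (c.set j.toNat (c.getD j.toNat 0 + k)).length = c.length := by simp
    rw [List.foldl_cons, ih _ (fun x hx => by rw [hlen]; exact hb x (List.mem_cons_of_mem _ hx)) i (hlen ▸ hi),
        List.count_cons]
    have hset : (c.set j.toNat (c.getD j.toNat 0 + k)).getD i 0
        = if j.toNat = i then c.getD j.toNat 0 + k else c.getD i 0 := by
      rw [List.getD_eq_getElem _ _ (hlen ▸ hi), List.getElem_set]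
      split_ifs with h
      · rw [List.getD_eq_getElem _ _ hjl]
      · rw [List.getD_eq_getElem _ _ hi]
    rw [hset]
    by_cases h : j.toNat = i
    · have hji : j = (i : Int) := by omega
      have hgd : c.getD i 0 = c.getD j.toNat 0 := by rw [h]
      rw [if_pos h, hgd, if_pos (by simp [hji])]
      push_cast; ring
    · have hji : j ≠ (i : Int) := by omega
      rw [if_neg h, if_neg (by simp [hji])]
      push_cast; ring

theorem outer_length (atts : List Int) (k : Int) : ∀ (S : List Int) (c : List Int),
    (scatter (buildPos atts) k c S).length = c.length := by
  intro S
  induction S with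
  | nil => intro c; rfl
  | cons a rest ih =>
    intro c
    unfold scatter at *
    simp only [List.foldl_cons]
    rw [ih, inner_length]

theorem outer_getD (atts : List Int) (k : Int) : ∀ (S : List Int), S.Nodup →
    ∀ (c : List Int), c.length = atts.length → ∀ (i : Nat) (hi : i < atts.length),
    (scatter (buildPos atts) k c S).getD i 0
      = c.getD i 0 + k * (if atts[i] ∈ S then 1 else 0) := by
  intro S
  induction S with
  | nil => intro _ c _ i _; simp [scatter]
  | cons a rest ih =>
    intro hnd c hc i hi
    unfold scatter at *
    simp only [List.foldl_cons]
    rw [ih hnd.of_cons _ (by rw [inner_length, hc]) i hi]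
    rw [inner_getD k _ c (fun j hj => by rw [hc]; exact buildPos_bounds atts a j hj) i (by omega)]
    rw [count_buildPos atts a i hi]
    by_cases h : atts[i] = a
    · have h1 : atts[i] ∉ rest := h ▸ (List.nodup_cons.mp hnd).1
      rw [if_pos h, if_neg h1, if_pos (by simp [h])]
      ring
    · by_cases h2 : atts[i] ∈ rest
      · rw [if_neg h, if_pos h2, if_pos (by simp [h2])]
        ring
      · rw [if_neg h, if_neg h2, if_neg (by simp [h, h2])]
        ring

-- one row of B equals one row of A
theorem row_eq (atts desc targ : List Int) :
    scatter (buildPos atts) 2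
      (scatter (buildPos atts) 1 (List.replicate atts.length (-1 : Int)) (PySem.List.dedup desc))
      (PySem.List.dedup targ)
    = atts.map (fun a => encode_attribute a desc targ) := by
  apply List.ext_getElem
  · rw [outer_length, outer_length]; simp
  · intro i hi1 hi2
    have hia : i < atts.length := by
      rw [outer_length, outer_length] at hi1; simpa using hi1
    have h1len : (scatter (buildPos atts) 1 (List.replicate atts.length (-1 : Int)) (PySem.List.dedup desc)).length = atts.length := by
      rw [outer_length]; simp
    rw [← List.getD_eq_getElem _ 0 hi1]
    rw [outer_getD atts 2 _ (PySem.List.nodup_dedup targ) _ h1len i hia]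
    rw [outer_getD atts 1 _ (PySem.List.nodup_dedup desc) _ (by simp) i hia]
    simp only [List.getElem_map, List.getD_eq_getElem _ 0 (by simpa using hia : i < (List.replicate atts.length (-1:Int)).length), List.getElem_replicate,
      PySem.List.mem_dedup]
    unfold encode_attribute
    simp only [List.contains_iff_mem]
    by_cases hd : atts[i] ∈ desc <;> by_cases ht : atts[i] ∈ targ <;> simp [hd, ht]

-- ===== VERDICT (by name: the statement is the Claim_ definition above) =====
theorem queries_to_codes_spec : Claim_equal_queries_to_codes := by
  intro qd qt qm atts _ hpre
  obtain ⟨h1, _, _⟩ := hpre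
  unfold Spec_queries_to_codes queries_to_codes queries_to_codes_alt
  cases atts with
  | none =>
    apply List.ext_getElem
    · simp [h1]
    · intro i hi1 hi2
      have hd : i < qd.length := by simpa using hi1
      have ht : i < qt.length := h1 ▸ hd
      simp only [List.getElem_map, List.getElem_range, List.getElem_zip, query_to_code,
        determine_atts, List.getD_eq_getElem _ _ hd, List.getD_eq_getElem _ _ ht]
      exact (row_eq _ _ _).symm
  | some as =>
    apply List.ext_getElem
    · simp [h1]
    · intro i hi1 hi2
      have hd : i < qd.length := by simpa using hi1
      have ht : i < qt.length := h1 ▸ hd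
      simp only [List.getElem_map, List.getElem_range, List.getElem_zip, query_to_code,
        List.getD_eq_getElem _ _ hd, List.getD_eq_getElem _ _ ht]
      exact (row_eq _ _ _).symm
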